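-- pv_equiv track=rewrite | github.com/junchenfeng/pyMLC | src/LTP/HMM/dirt_util.py | encode_log2state
-- ===== SOURCE A (Python) =====
-- from collections import defaultdict
--
-- def encode_log2state(logs):
--     """
--     输入：[(j,y,e)]
--     事实上t无用
--
--     输出:J|Y0E0|Y0E1|Y1E1
--     """
--     Y1E1s = []; Y0E1s = []; Y0E0s = []
--     log_dict = {}
--     for log in logs:
--         j = str(log[0])
--         y = int(log[1])
--         e = int(log[2])
--         if j not in log_dict:
--             log_dict[j] = defaultdict(int)
--         log_dict[j][2**y+e] += 1    # 默认Y1E0不存在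
--
--     sorted_Js = sorted(log_dict.keys())
--     for j in sorted_Js:
--         Y0E0s.append(str(log_dict[j][1]))
--         Y0E1s.append(str(log_dict[j][2]))
--         Y1E1s.append(str(log_dict[j][3]))
--
--     state_id = ','.join(sorted_Js) + '|' + ','.join(Y0E0s) + '|' + ','.join(Y0E1s) + '|' + ','.join(Y1E1s)
--     return state_id
-- ===== SOURCE B (Python) =====
-- def encode_log2state(logs):
--     """Sort the records by key, then one linear scan grouping adjacent runs with
--     three counters per run -- no dictionary at all."""
--     recs = sorted(((str(j), 2 ** int(y) + int(e)) for j, y, e in logs),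
--                   key=lambda p: p[0])
--     keys = []; y0e0 = []; y0e1 = []; y1e1 = []
--     i = 0
--     n = len(recs)
--     while i < n:
--         k = recs[i][0]
--         c1 = c2 = c3 = 0
--         while i < n and recs[i][0] == k:
--             c = recs[i][1]
--             if c == 1:
--                 c1 += 1
--             elif c == 2:
--                 c2 += 1
--             elif c == 3:
--                 c3 += 1
--             i += 1
--         keys.append(k)
--         y0e0.append(str(c1)); y0e1.append(str(c2)); y1e1.append(str(c3))
--     return ','.join(keys) + '|' + ','.join(y0e0) + '|' + ','.join(y0e1) + '|' + ','.join(y1e1)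
-- ===== Notes on version B (the rewrite author's own statement) =====
-- stated objective: alternative
-- what changed: Replaces A's hash-map of per-key defaultdict counters plus a sort of the keys by sorting the records themselves by key and doing one linear scan that groups adjacent equal-key runs with three plain counters, no dictionary at all.
import Mathlib
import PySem

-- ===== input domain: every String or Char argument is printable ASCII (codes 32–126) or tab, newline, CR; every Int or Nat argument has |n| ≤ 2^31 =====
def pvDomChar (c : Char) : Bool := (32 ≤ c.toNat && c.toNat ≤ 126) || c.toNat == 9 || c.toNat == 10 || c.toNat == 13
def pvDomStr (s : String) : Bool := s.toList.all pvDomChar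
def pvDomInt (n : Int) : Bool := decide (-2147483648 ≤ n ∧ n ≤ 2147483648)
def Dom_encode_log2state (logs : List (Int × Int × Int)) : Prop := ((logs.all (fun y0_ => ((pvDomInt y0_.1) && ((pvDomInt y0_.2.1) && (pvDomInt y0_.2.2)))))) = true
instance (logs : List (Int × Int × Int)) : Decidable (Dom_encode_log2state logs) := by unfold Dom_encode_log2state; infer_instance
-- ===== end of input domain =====

-- B sorts the records by key and groups adjacent equal-key runs with three counters,
-- instead of A's nested dict of per-key defaultdict counters (objective: alternative).

-- Shared helper: the Python expression 2**y + e used as a counter key. Only the keys 1, 2 and 3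
-- of the per-key counter are ever read (dict lookup identifies the float 1.0/2.0/3.0 with the int
-- key). For 0 ≤ y ≤ 33 the value is exact. For y > 33 it exceeds 2^34 - 2^31 > 3 (|e| ≤ 2^31 on
-- Dom). For y < 0 Python evaluates 2**y as the IEEE double 2.0**y and adds the (exactly
-- representable) e: the rounded sum equals the integer e exactly when 2^y ≤ half an ulp of e
-- (ties round to the even mantissas of 1.0/2.0/3.0), i.e. y ≤ -53 for e = 1 and y ≤ -52 for
-- e = 2 or 3; otherwise the sum is non-integral. All keys other than 1/2/3 are written but never
-- read and are represented by the never-read key 0: every read key gets exactly Python's count.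
def pvCodeVal (y e : Int) : Int :=
  if 0 ≤ y ∧ y ≤ 33 then 2 ^ y.toNat + e
  else if y ≤ -53 ∧ e = 1 then 1
  else if y ≤ -52 ∧ (e = 2 ∨ e = 3) then e
  else 0

-- ===== PORT A =====
-- one iteration of A's first loop: guarded insertion of a fresh inner counter, then log_dict[j][code] += 1
def pvStepA (d : PySem.Dict String (PySem.Dict Int Int)) (log : Int × Int × Int) :
    PySem.Dict String (PySem.Dict Int Int) :=
  let j := PySem.Int.toStr log.1
  let d' := if d.contains j then d else d.insert j PySem.Dict.empty
  d'.modify j PySem.Dict.empty (fun m => m.modify (pvCodeVal log.2.1 log.2.2) 0 (· + 1))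

def encode_log2state (logs : List (Int × Int × Int)) : String :=
  let logDict := logs.foldl pvStepA PySem.Dict.empty
  let sortedJs := PySem.List.sorted logDict.keys (fun x => x) false
  -- second loop: append the three formatted counts per sorted key (log_dict[j] read as getD:
  -- exact, j is a key of the dict; reading a missing counter key returns the defaultdict's 0)
  let trip := sortedJs.foldl
    (fun (acc : List String × List String × List String) j =>
      (acc.1 ++ [PySem.Int.toStr ((logDict.getD j PySem.Dict.empty).getD 1 0)],
       acc.2.1 ++ [PySem.Int.toStr ((logDict.getD j PySem.Dict.empty).getD 2 0)],
       acc.2.2 ++ [PySem.Int.toStr ((logDict.getD j PySem.Dict.empty).getD 3 0)]))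
    ([], [], [])
  PySem.Str.join "," sortedJs ++ "|" ++ PySem.Str.join "," trip.1 ++ "|" ++
    PySem.Str.join "," trip.2.1 ++ "|" ++ PySem.Str.join "," trip.2.2

-- ===== PORT B =====
-- Source B's inner while loop: scan one run of records with the current key, keeping three counters
def pvRunCount (run : List (String × Int)) : Int × Int × Int :=
  run.foldl
    (fun (a : Int × Int × Int) p =>
      if p.2 == 1 then (a.1 + 1, a.2.1, a.2.2)
      else if p.2 == 2 then (a.1, a.2.1 + 1, a.2.2)
      else if p.2 == 3 then (a.1, a.2.1, a.2.2 + 1)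
      else a)
    (0, 0, 0)

-- Source B's outer while loop: peel off the adjacent run of the first record's key, recurse on the rest
def pvGroupScan : List (String × Int) → List (String × (Int × Int × Int))
  | [] => []
  | (k, c) :: rest =>
      (k, pvRunCount ((k, c) :: rest.takeWhile (fun p => p.1 == k)))
        :: pvGroupScan (rest.dropWhile (fun p => p.1 == k))
termination_by l => l.length
decreasing_by
  simpa using Nat.lt_succ_of_le (List.Sublist.length_le (List.dropWhile_sublist _))

def encode_log2state_alt (logs : List (Int × Int × Int)) : String :=
  let recs := PySem.List.sorted
    (logs.map (fun l => (PySem.Int.toStr l.1, pvCodeVal l.2.1 l.2.2))) (fun p => p.1) false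
  let groups := pvGroupScan recs
  PySem.Str.join "," (groups.map (fun g => g.1)) ++ "|" ++
    PySem.Str.join "," (groups.map (fun g => PySem.Int.toStr g.2.1)) ++ "|" ++
    PySem.Str.join "," (groups.map (fun g => PySem.Int.toStr g.2.2.1)) ++ "|" ++
    PySem.Str.join "," (groups.map (fun g => PySem.Int.toStr g.2.2.2))

-- ===== PRECONDITION & SPEC =====
def Spec_encode_log2state (logs : List (Int × Int × Int)) (out : String) : Prop := out = encode_log2state_alt logs
instance (logs : List (Int × Int × Int)) (out : String) : Decidable (Spec_encode_log2state logs out) := by unfold Spec_encode_log2state; infer_instance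

-- ===== CLAIM =====
def Claim_equal_encode_log2state : Prop := ∀ (logs : List (Int × Int × Int)), Dom_encode_log2state logs → Spec_encode_log2state logs (encode_log2state logs)

-- ===== LEMMAS AND PROOFS =====

-- the Python pair key of a log record
def pvKeyOf (l : Int × Int × Int) : String × Int := (PySem.Int.toStr l.1, pvCodeVal l.2.1 l.2.2)

-- the guarded insertion does not change any lookup with default Dict.empty
lemma pvGetD_guard (d : PySem.Dict String (PySem.Dict Int Int)) (j0 j : String) :
    ((if d.contains j0 then d else d.insert j0 PySem.Dict.empty).getD j PySem.Dict.empty)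
      = d.getD j PySem.Dict.empty := by
  by_cases h : d.contains j0
  · simp [h]
  · simp only [Bool.not_eq_true] at h
    by_cases hj : j = j0
    · subst hj
      rw [if_neg (by simp [h]), PySem.Dict.getD_insert_self, PySem.Dict.getD_of_not_contains d _ h]
    · rw [if_neg (by simp [h]), PySem.Dict.getD_insert_of_ne d _ _ hj]

-- invariant of A's first loop: the count stored under (j, c) grows by the number of matching records
lemma pvBuild_getD (logs : List (Int × Int × Int)) :
    ∀ (d : PySem.Dict String (PySem.Dict Int Int)) (j : String) (c : Int),
    ((logs.foldl pvStepA d).getD j PySem.Dict.empty).getD c 0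
      = (d.getD j PySem.Dict.empty).getD c 0 + (List.count (j, c) (logs.map pvKeyOf) : Int) := by
  induction logs with
  | nil => intro d j c; simp
  | cons l ls ih =>
    intro d j c
    rw [List.foldl_cons, ih]
    have hstep : ((pvStepA d l).getD j PySem.Dict.empty).getD c 0
        = (d.getD j PySem.Dict.empty).getD c 0
          + (if (j, c) = pvKeyOf l then (1 : Int) else 0) := by
      unfold pvStepA
      rw [PySem.Dict.getD_modify, pvGetD_guard]
      by_cases hj : j = PySem.Int.toStr l.1
      · rw [if_pos hj, PySem.Dict.getD_modify]
        by_cases hc : c = pvCodeVal l.2.1 l.2.2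
        · simp [pvKeyOf, hj, hc]
        · simp [pvKeyOf, hj, hc]
      · simp [pvKeyOf, hj, pvGetD_guard]
    rw [hstep, List.map_cons, List.count_cons]
    by_cases hl : (j, c) = pvKeyOf l
    · rw [if_pos hl]
      simp only [beq_iff_eq, ← hl]
      push_cast
      ring
    · rw [if_neg hl]
      simp only [beq_iff_eq]
      rw [if_neg (fun h => hl h.symm)]
      push_cast
      ring

-- invariant of A's first loop: the keys are the distinct record keys in first-occurrence order
lemma pvBuild_keys (logs : List (Int × Int × Int)) :
    ∀ (d : PySem.Dict String (PySem.Dict Int Int)),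
    (logs.foldl pvStepA d).keys = PySem.Set.update d.keys (logs.map (fun l => PySem.Int.toStr l.1)) := by
  induction logs with
  | nil => intro d; simp [PySem.Set.update]
  | cons l ls ih =>
    intro d
    rw [List.foldl_cons, ih]
    have hstep : (pvStepA d l).keys = PySem.Set.add d.keys (PySem.Int.toStr l.1) := by
      unfold pvStepA
      rw [PySem.Dict.keys_modify, PySem.Dict.keys_insert_of_contains]
      · by_cases h : d.contains (PySem.Int.toStr l.1)
        · rw [if_pos h]
          simp [PySem.Set.add, (PySem.Dict.contains_iff_mem_keys d _).mp h]
        · rw [if_neg (by simp [h])]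
          rw [PySem.Dict.keys_insert_of_not_contains d _ (by simpa using h)]
          have hm : PySem.Int.toStr l.1 ∉ d.keys :=
            fun hm => h ((PySem.Dict.contains_iff_mem_keys d _).mpr hm)
          simp [PySem.Set.add, hm]
      · by_cases h : d.contains (PySem.Int.toStr l.1)
        · rw [if_pos h]; exact h
        · rw [if_neg (by simp [h])]; exact PySem.Dict.contains_insert_self d _ _
    rw [hstep]
    rfl

-- A's second loop produces exactly the three mapped columns
lemma pvTripleFold {α : Type} (f1 f2 f3 : α → String) (l : List α) :
    ∀ (a b c : List String),
    l.foldl (fun (acc : List String × List String × List String) x =>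
        (acc.1 ++ [f1 x], acc.2.1 ++ [f2 x], acc.2.2 ++ [f3 x])) (a, b, c)
      = (a ++ l.map f1, b ++ l.map f2, c ++ l.map f3) := by
  induction l with
  | nil => intro a b c; simp
  | cons x xs ih => intro a b c; rw [List.foldl_cons, ih]; simp

-- A in canonical form: sorted distinct keys, columns of counts of (key, code) pairs
lemma pvA_canon (logs : List (Int × Int × Int)) :
    encode_log2state logs =
      (let pairs := logs.map pvKeyOf
       let keys := PySem.List.sorted (PySem.Set.ofList (pairs.map Prod.fst)) (fun x => x) false
       let col := fun (c : Int) =>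
        PySem.Str.join "," (keys.map (fun k => PySem.Int.toStr (List.count (k, c) pairs : Int)))
       PySem.Str.join "," keys ++ "|" ++ col 1 ++ "|" ++ col 2 ++ "|" ++ col 3) := by
  unfold encode_log2state
  have hkeys : (logs.foldl pvStepA PySem.Dict.empty).keys
      = PySem.Set.ofList ((logs.map pvKeyOf).map Prod.fst) := by
    rw [pvBuild_keys]
    simp only [List.map_map]
    rfl
  have hcol : ∀ c : Int,
      (fun j => PySem.Int.toStr (((logs.foldl pvStepA PySem.Dict.empty).getD j PySem.Dict.empty).getD c 0))
        = (fun k => PySem.Int.toStr ((List.count (k, c) (logs.map pvKeyOf) : Int))) := by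
    intro c
    funext j
    rw [pvBuild_getD]
    simp
  simp only [hkeys, pvTripleFold, List.nil_append]
  rw [hcol 1, hcol 2, hcol 3]

-- B's run counter is the triple of code counts
lemma pvRunCount_aux (run : List (String × Int)) :
    ∀ (a b c : Int),
    run.foldl
      (fun (a : Int × Int × Int) p =>
        if p.2 == 1 then (a.1 + 1, a.2.1, a.2.2)
        else if p.2 == 2 then (a.1, a.2.1 + 1, a.2.2)
        else if p.2 == 3 then (a.1, a.2.1, a.2.2 + 1)
        else a)
      (a, b, c)
      = (a + (run.countP (fun p => p.2 == 1) : Int),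
         b + (run.countP (fun p => p.2 == 2) : Int),
         c + (run.countP (fun p => p.2 == 3) : Int)) := by
  induction run with
  | nil => intro a b c; simp
  | cons p t ih =>
    intro a b c
    rw [List.foldl_cons]
    by_cases h1 : p.2 = 1
    · rw [if_pos (by simp [h1]), ih]
      simp only [List.countP_cons, h1, Prod.mk.injEq]
      norm_num
      omega
    · by_cases h2 : p.2 = 2
      · rw [if_neg (by simp [h1]), if_pos (by simp [h2]), ih]
        simp only [List.countP_cons, h2, Prod.mk.injEq]
        norm_num
        omega
      · by_cases h3 : p.2 = 3
        · rw [if_neg (by simp [h1]), if_neg (by simp [h2]), if_pos (by simp [h3]), ih]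
          simp only [List.countP_cons, h3, Prod.mk.injEq]
          norm_num
          omega
        · rw [if_neg (by simp [h1]), if_neg (by simp [h2]), if_neg (by simp [h3]), ih]
          simp [h1, h2, h3]

lemma pvRunCount_eq (run : List (String × Int)) :
    pvRunCount run = ((run.countP (fun p => p.2 == 1) : Int),
                      (run.countP (fun p => p.2 == 2) : Int),
                      (run.countP (fun p => p.2 == 3) : Int)) := by
  unfold pvRunCount
  rw [pvRunCount_aux]
  simp

-- after dropping the leading run of key k from a key-sorted list, every key is strictly above k
lemma pvDrop_keys_gt (k : String) (rest : List (String × Int))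
    (hs : rest.Pairwise (fun a b => a.1 ≤ b.1)) (hk : ∀ p ∈ rest, k ≤ p.1) :
    ∀ p ∈ rest.dropWhile (fun p => p.1 == k), k < p.1 := by
  induction rest with
  | nil => simp
  | cons q t ih =>
    rw [List.dropWhile_cons]
    by_cases hq : q.1 = k
    · rw [if_pos (by simp [hq])]
      exact ih (List.Pairwise.of_cons hs) (fun p hp => hk p (List.mem_cons_of_mem q hp))
    · rw [if_neg (by simp [hq])]
      intro p hp
      have hkq : k < q.1 := lt_of_le_of_ne (hk q (List.mem_cons_self)) (fun h => hq h.symm)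
      rcases List.mem_cons.mp hp with h | h
      · exact h ▸ hkq
      · exact lt_of_lt_of_le hkq ((List.pairwise_cons.mp hs).1 p h)

-- master invariant of B's outer loop on a key-sorted list: the group keys are the
-- distinct record keys, strictly increasing, and each group carries the list-wide counts
lemma pvGroupScan_spec : ∀ (n : Nat) (ps : List (String × Int)), ps.length ≤ n →
    ps.Pairwise (fun a b => a.1 ≤ b.1) →
    (∀ k, k ∈ (pvGroupScan ps).map Prod.fst ↔ k ∈ ps.map Prod.fst) ∧
    ((pvGroupScan ps).map Prod.fst).Pairwise (· < ·) ∧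
    (∀ g ∈ pvGroupScan ps,
      g.2 = ((ps.count (g.1, 1) : Int), (ps.count (g.1, 2) : Int), (ps.count (g.1, 3) : Int))) := by
  intro n
  induction n with
  | zero =>
    intro ps hlen _
    have : ps = [] := List.length_eq_zero_iff.mp (Nat.le_zero.mp hlen)
    subst this
    simp [pvGroupScan]
  | succ n ih =>
    intro ps hlen hsort
    match ps with
    | [] => simp [pvGroupScan]
    | (k, c) :: rest =>
      have hk : ∀ p ∈ rest, k ≤ p.1 := fun p hp => (List.pairwise_cons.mp hsort).1 p hp
      have hrsort : rest.Pairwise (fun a b => a.1 ≤ b.1) := (List.pairwise_cons.mp hsort).2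
      have hrun : ∀ p ∈ rest.takeWhile (fun p => p.1 == k), p.1 = k :=
        fun p hp => by simpa using List.mem_takeWhile_imp hp
      have hsplit : rest.takeWhile (fun p => p.1 == k) ++ rest.dropWhile (fun p => p.1 == k) = rest :=
        List.takeWhile_append_dropWhile
      have hgt : ∀ p ∈ rest.dropWhile (fun p => p.1 == k), k < p.1 := pvDrop_keys_gt k rest hrsort hk
      have hrstsort : (rest.dropWhile (fun p => p.1 == k)).Pairwise (fun a b => a.1 ≤ b.1) :=
        hrsort.sublist (List.dropWhile_sublist _)
      have hrstlen : (rest.dropWhile (fun p => p.1 == k)).length ≤ n := by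
        have h1 := List.Sublist.length_le (List.dropWhile_sublist (l := rest) (p := fun p => p.1 == k))
        simp at hlen
        omega
      obtain ⟨ihmem, ihpw, ihcnt⟩ := ih (rest.dropWhile (fun p => p.1 == k)) hrstlen hrstsort
      rw [show pvGroupScan ((k, c) :: rest)
            = (k, pvRunCount ((k, c) :: rest.takeWhile (fun p => p.1 == k)))
              :: pvGroupScan (rest.dropWhile (fun p => p.1 == k)) from by rw [pvGroupScan]]
      -- every key of the tail groups is strictly above k
      have htailgt : ∀ k' ∈ (pvGroupScan (rest.dropWhile (fun p => p.1 == k))).map Prod.fst, k < k' := by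
        intro k' hk'
        rcases List.mem_map.mp ((ihmem k').mp hk') with ⟨p, hp, hpk⟩
        exact hpk ▸ hgt p hp
      refine ⟨?_, ?_, ?_⟩
      · intro k'
        have hres : ((k, c) :: rest).map Prod.fst
            = k :: ((rest.takeWhile (fun p => p.1 == k)).map Prod.fst
                    ++ (rest.dropWhile (fun p => p.1 == k)).map Prod.fst) := by
          rw [List.map_cons]
          congr 1
          rw [← List.map_append, hsplit]
        rw [List.map_cons, hres]
        simp only [List.mem_cons, List.mem_append, ihmem k']
        constructor
        · rintro (h | h)
          · exact Or.inl h
          · exact Or.inr (Or.inr h)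
        · rintro (h | h | h)
          · exact Or.inl h
          · rcases List.mem_map.mp h with ⟨p, hp, hpk⟩
            exact Or.inl (hpk ▸ (hrun p hp))
          · exact Or.inr h
      · rw [List.map_cons, List.pairwise_cons]
        exact ⟨htailgt, ihpw⟩
      · intro g hg
        rcases List.mem_cons.mp hg with hg | hg
        · subst hg
          dsimp only
          have hcnt : ∀ ci : Int,
              (((k, c) :: rest).count (k, ci) : Int)
                = (((k, c) :: rest.takeWhile (fun p => p.1 == k)).countP (fun p => p.2 == ci) : Int) := by
            intro ci
            have h0 : (rest.dropWhile (fun p => p.1 == k)).count (k, ci) = 0 :=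
              List.count_eq_zero.mpr (fun hmem => lt_irrefl k (hgt _ hmem))
            have hcp : (((k, c) :: rest.takeWhile (fun p => p.1 == k)).count (k, ci))
                = (((k, c) :: rest.takeWhile (fun p => p.1 == k)).countP (fun p => p.2 == ci)) := by
              rw [List.count_eq_countP]
              refine List.countP_congr ?_
              intro p hp
              have hpk : p.1 = k := by
                rcases List.mem_cons.mp hp with h | h
                · rw [h]
                · exact hrun p h
              constructor
              · intro h
                have hpe : p = (k, ci) := by simpa using h
                simp [hpe]
              · intro h
                have hpe : p = (k, ci) := Prod.ext hpk (by simpa using h)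
                simp [hpe]
            have hct : ((k, c) :: rest).count (k, ci)
                = ((k, c) :: rest.takeWhile (fun p => p.1 == k)).count (k, ci) := by
              conv_lhs => rw [← hsplit, ← List.cons_append, List.count_append, h0]
              omega
            rw [hct, hcp]
          rw [pvRunCount_eq, hcnt 1, hcnt 2, hcnt 3]
        · have hval := ihcnt g hg
          rw [hval]
          have hgk : k < g.1 := htailgt g.1 (List.mem_map.mpr ⟨g, hg, rfl⟩)
          have hcnt : ∀ ci : Int,
              ((rest.dropWhile (fun p => p.1 == k)).count (g.1, ci))
                = (((k, c) :: rest).count (g.1, ci)) := by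
            intro ci
            have h0 : (((k, c) :: rest.takeWhile (fun p => p.1 == k)).count (g.1, ci)) = 0 := by
              refine List.count_eq_zero.mpr ?_
              intro hmem
              have hfst : g.1 = k := by
                rcases List.mem_cons.mp hmem with h | h
                · exact congrArg Prod.fst h
                · exact hrun _ h
              exact hgk.ne hfst.symm
            conv_rhs => rw [← hsplit, ← List.cons_append, List.count_append, h0]
            omega
          rw [hcnt 1, hcnt 2, hcnt 3]

theorem pv_encode_eq (logs : List (Int × Int × Int)) :
    encode_log2state logs = encode_log2state_alt logs := by
  rw [pvA_canon]
  unfold encode_log2state_alt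
  have hmapKey : (fun l : Int × Int × Int => (PySem.Int.toStr l.1, pvCodeVal l.2.1 l.2.2)) = pvKeyOf := rfl
  rw [hmapKey]
  have hsorted : (PySem.List.sorted (logs.map pvKeyOf) (fun p => p.1) false).Pairwise
      (fun a b => a.1 ≤ b.1) := PySem.List.sorted_pairwise (logs.map pvKeyOf) (fun p => p.1)
  obtain ⟨hmem, hpw, hcnt⟩ := pvGroupScan_spec
    (PySem.List.sorted (logs.map pvKeyOf) (fun p => p.1) false).length
    (PySem.List.sorted (logs.map pvKeyOf) (fun p => p.1) false) le_rfl hsorted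
  have hrecsperm : (PySem.List.sorted (logs.map pvKeyOf) (fun p => p.1) false).Perm (logs.map pvKeyOf) :=
    PySem.List.sorted_perm _ _ _
  have hperm : ((pvGroupScan (PySem.List.sorted (logs.map pvKeyOf) (fun p => p.1) false)).map Prod.fst).Perm
      (PySem.Set.ofList ((logs.map pvKeyOf).map Prod.fst)) := by
    refine (List.perm_ext_iff_of_nodup (hpw.imp fun h => ne_of_lt h) (PySem.Set.nodup_ofList _)).mpr ?_
    intro a
    rw [hmem, PySem.Set.mem_ofList]
    constructor
    · rintro h
      rcases List.mem_map.mp h with ⟨p, hp, hpk⟩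
      exact List.mem_map.mpr ⟨p, hrecsperm.mem_iff.mp hp, hpk⟩
    · rintro h
      rcases List.mem_map.mp h with ⟨p, hp, hpk⟩
      exact List.mem_map.mpr ⟨p, hrecsperm.mem_iff.mpr hp, hpk⟩
  have hkeysB : PySem.List.sorted (PySem.Set.ofList ((logs.map pvKeyOf).map Prod.fst)) (fun x => x) false
      = (pvGroupScan (PySem.List.sorted (logs.map pvKeyOf) (fun p => p.1) false)).map Prod.fst :=
    PySem.List.sorted_id_eq_of_perm_of_pairwise _ _ hperm (hpw.imp fun h => le_of_lt h)
  have hcol : ∀ (c : Int) (sel : Int × Int × Int → Int),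
      (∀ a b d : Int, sel (a, b, d) = if c = 1 then a else if c = 2 then b else d) →
      (c = 1 ∨ c = 2 ∨ c = 3) →
      ((pvGroupScan (PySem.List.sorted (logs.map pvKeyOf) (fun p => p.1) false)).map Prod.fst).map
          (fun k => PySem.Int.toStr ((List.count (k, c) (logs.map pvKeyOf) : Int)))
        = (pvGroupScan (PySem.List.sorted (logs.map pvKeyOf) (fun p => p.1) false)).map
            (fun g => PySem.Int.toStr (sel g.2)) := by
    intro c sel hsel hc
    rw [List.map_map]
    refine List.map_congr_left ?_
    intro g hg
    have hv := hcnt g hg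
    have hcc : List.count (g.1, c) (logs.map pvKeyOf)
        = List.count (g.1, c) (PySem.List.sorted (logs.map pvKeyOf) (fun p => p.1) false) :=
      (hrecsperm.count_eq _).symm
    simp only [Function.comp, hcc, hv, hsel]
    rcases hc with h | h | h <;> subst h <;> norm_num
  simp only [hkeysB]
  rw [hcol 1 (fun t => t.1) (by intro a b d; norm_num) (Or.inl rfl),
      hcol 2 (fun t => t.2.1) (by intro a b d; norm_num) (Or.inr (Or.inl rfl)),
      hcol 3 (fun t => t.2.2) (by intro a b d; norm_num) (Or.inr (Or.inr rfl))]

-- ===== VERDICT =====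
theorem encode_log2state_spec : Claim_equal_encode_log2state := by
  intro logs _
  unfold Spec_encode_log2state
  exact pv_encode_eq logs
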